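-- pv_equiv track=rewrite | github.com/PingpingPapa/Python_Note | this_is_coding_test/Ch8_Currency.py | ecc
-- ===== SOURCE A (Python) =====
-- def ecc(coins, m):
--     if m <= max(coins):
--         if not m in coins:
--             return -1
--         else:
--             return 1
--
--     best_coin = coins[0]
--     for coin in coins:
--         if ecc(coins, m-best_coin) == -1:
--             best_coin = coin
--         elif ecc(coins, m-coin) != -1 and (ecc(coins, m-coin) < ecc(coins, m-best_coin)):
--             best_coin = coin
--         else:
--             pass
--
--     if ecc(coins, m-best_coin) == -1:
--         return -1
--     else:
--         return ecc(coins, m-best_coin)+1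
-- ===== SOURCE B (Python) =====
-- def ecc(coins, m):
--     mx = max(coins)
--     if m <= mx:
--         return 1 if m in coins else -1
--     dp = []
--     for i in range(m - mx):
--         t = mx + 1 + i
--         best = -1
--         for c in coins:
--             if t - c <= mx:
--                 v = 1 if (t - c) in coins else -1
--             else:
--                 v = dp[t - c - mx - 1]
--             if v != -1 and (best == -1 or v < best):
--                 best = v
--         dp.append(best + 1 if best != -1 else -1)
--     return dp[m - mx - 1]
-- ===== Notes on version B (the rewrite author's own statement) =====
-- stated objective: alternative
-- what changed: replaces A's plain exponential recursion (which re-evaluates ecc(coins, m-x) several times per loop iteration) with a bottom-up dynamic-programming table over the amounts max(coins)+1..m, reproducing A's quirky base case (amounts <= max(coins) count only as a single exact coin) exactly; the trade is O((m-max)*len(coins)) table work versus A's exponential recursion when m is far above max(coins)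
import Mathlib
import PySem

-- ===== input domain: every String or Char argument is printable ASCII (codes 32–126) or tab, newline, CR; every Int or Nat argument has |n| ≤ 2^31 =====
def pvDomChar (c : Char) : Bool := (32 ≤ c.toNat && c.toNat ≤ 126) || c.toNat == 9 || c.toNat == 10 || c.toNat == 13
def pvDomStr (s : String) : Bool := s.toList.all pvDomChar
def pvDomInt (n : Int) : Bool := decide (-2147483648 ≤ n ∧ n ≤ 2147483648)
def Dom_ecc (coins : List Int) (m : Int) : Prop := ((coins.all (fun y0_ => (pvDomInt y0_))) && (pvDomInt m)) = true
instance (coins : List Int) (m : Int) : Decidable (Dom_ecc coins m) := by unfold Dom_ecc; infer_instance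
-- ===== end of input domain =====

-- B replaces A's exponential recursion by a bottom-up DP table over the amounts
-- max(coins)+1 .. m, reproducing A's quirky base case exactly (alternative algorithm).

-- ===== PORT A =====
-- max(coins); Python raises ValueError on [], which Pre_ecc excludes.
def eccMax (coins : List Int) : Int := (PySem.List.max? coins (fun y => y)).getD 0

-- A's recursion 'ecc(coins, m - coin)' is not structurally decreasing, so the port
-- carries explicit fuel; ecc supplies (m - max(coins)).toNat + 1, which bounds the
-- depth whenever the Python recursion terminates (exactly the inputs in Pre_ecc).
def eccFuel (coins : List Int) : Nat → Int → Int
  | 0, _ => -1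
  | fuel + 1, m =>
    if m ≤ eccMax coins then
      if ¬ coins.contains m then -1 else 1
    else
      let best := coins.foldl (fun best_coin coin =>
        if eccFuel coins fuel (m - best_coin) = -1 then coin
        else if eccFuel coins fuel (m - coin) ≠ -1 ∧
                eccFuel coins fuel (m - coin) < eccFuel coins fuel (m - best_coin) then coin
        else best_coin) ((PySem.List.pyGet? coins 0).getD 0)
      if eccFuel coins fuel (m - best) = -1 then -1
      else eccFuel coins fuel (m - best) + 1

def ecc (coins : List Int) (m : Int) : Int :=
  eccFuel coins ((m - eccMax coins).toNat + 1) m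

-- ===== PORT B =====
def ecc_alt (coins : List Int) (m : Int) : Int :=
  let mx := eccMax coins
  if m ≤ mx then
    if coins.contains m then 1 else -1
  else
    let dp := (PySem.List.pyRange 0 (m - mx) 1).foldl (fun dp i =>
      let t := mx + 1 + i
      let best := coins.foldl (fun best c =>
        let v := if t - c ≤ mx then (if coins.contains (t - c) then 1 else -1)
                 else (PySem.List.pyGet? dp (t - c - mx - 1)).getD 0
        if v ≠ -1 ∧ (best = -1 ∨ v < best) then v else best) (-1)
      dp ++ [if best ≠ -1 then best + 1 else -1]) ([] : List Int)
    (PySem.List.pyGet? dp (m - mx - 1)).getD 0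

-- ===== PRECONDITION & SPEC =====
-- Pre_ecc excludes the empty list (max(coins) raises ValueError) and, when the
-- recursive branch is reached (m > max(coins)), lists with a nonpositive coin,
-- on which A's recursion never terminates (RecursionError).
def Pre_ecc (coins : List Int) (m : Int) : Prop :=
  coins ≠ [] ∧ (m ≤ eccMax coins ∨ ∀ c ∈ coins, 0 < c)
instance (coins : List Int) (m : Int) : Decidable (Pre_ecc coins m) := by
  unfold Pre_ecc; infer_instance

def pvWitness_ecc : List Int × Int := ([1, 2, 5], 7)

def Spec_ecc (coins : List Int) (m : Int) (out : Int) : Prop := out = ecc_alt coins m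
instance (coins : List Int) (m : Int) (out : Int) : Decidable (Spec_ecc coins m out) := by
  unfold Spec_ecc; infer_instance

-- ===== CLAIM (what is proved, stated in full; the proofs are below) =====
def Claim_equal_ecc : Prop := ∀ (coins : List Int) (m : Int), Dom_ecc coins m → Pre_ecc coins m → Spec_ecc coins m (ecc coins m)

-- ===== LEMMAS AND PROOFS =====

-- A's loop step, abstracted over g x = ecc(coins, m - x).
def stepA (g : Int → Int) (b c : Int) : Int :=
  if g b = -1 then c
  else if g c ≠ -1 ∧ g c < g b then c
  else b

-- B's inner-loop step, abstracted over the value function.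
def minStep (g : Int → Int) (best c : Int) : Int :=
  if g c ≠ -1 ∧ (best = -1 ∨ g c < best) then g c else best

-- Invariant of A's best_coin loop: the running minimum of B equals g of A's best_coin.
theorem loopInv (g : Int → Int) (l : List Int) (b best : Int) (h : best = g b) :
    g (l.foldl (stepA g) b) = l.foldl (minStep g) best := by
  induction l generalizing b best with
  | nil => simp [h]
  | cons c l ih =>
    simp only [List.foldl_cons]
    apply ih
    subst h
    unfold stepA minStep
    by_cases h1 : g b = -1
    · by_cases h2 : g c = -1 <;> simp [h1, h2]
    · by_cases h2 : g c ≠ -1 ∧ g c < g b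
      · simp [h1, h2]
      · have : ¬ (g c ≠ -1 ∧ (g b = -1 ∨ g c < g b)) := by tauto
        simp [h1, h2]

theorem loopFull (g : Int → Int) (h : Int) (t : List Int) :
    g ((h :: t).foldl (stepA g) h) = (h :: t).foldl (minStep g) (-1) := by
  simp only [List.foldl_cons]
  apply loopInv
  unfold stepA minStep
  by_cases h1 : g h = -1 <;> simp [h1]

-- One unfolding of A's recursive branch, with the inner calls already rewritten to ecc.
theorem eccFuel_succ_big (coins : List Int) (hne : coins ≠ []) (f : Nat) (m : Int)
    (hm : ¬ m ≤ eccMax coins)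
    (hg : ∀ c ∈ coins, eccFuel coins f (m - c) = ecc coins (m - c)) :
    eccFuel coins (f + 1) m =
      (if coins.foldl (minStep (fun c => ecc coins (m - c))) (-1) = -1 then -1
       else coins.foldl (minStep (fun c => ecc coins (m - c))) (-1) + 1) := by
  obtain ⟨h, t, rfl⟩ : ∃ h t, coins = h :: t := by
    cases coins with
    | nil => exact absurd rfl hne
    | cons h t => exact ⟨h, t, rfl⟩
  have hval := loopFull (fun x => eccFuel (h :: t) f (m - x)) h t
  unfold stepA minStep at hval
  beta_reduce at hval
  simp only [eccFuel, hm, if_false, PySem.List.pyGet?_zero_cons, Option.getD_some]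
  rw [hval]
  have hcongr : (h :: t).foldl
      (fun best c => if eccFuel (h :: t) f (m - c) ≠ -1 ∧ (best = -1 ∨ eccFuel (h :: t) f (m - c) < best)
        then eccFuel (h :: t) f (m - c) else best) (-1)
      = (h :: t).foldl (minStep (fun c => ecc (h :: t) (m - c))) (-1) := by
    apply PySem.List.foldl_congr_mem
    intro acc x hx
    unfold minStep
    rw [hg x hx]
  rw [hcongr]

theorem stable (coins : List Int) (hne : coins ≠ []) (hpos : ∀ c ∈ coins, 0 < c) :
    ∀ fuel m, (m - eccMax coins).toNat < fuel → eccFuel coins fuel m = ecc coins m := by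
  intro fuel
  induction fuel using Nat.strong_induction_on with
  | _ fuel ih =>
    intro m hm
    obtain ⟨f, rfl⟩ : ∃ f, fuel = f + 1 := ⟨fuel - 1, by omega⟩
    by_cases hb : m ≤ eccMax coins
    · show _ = eccFuel coins ((m - eccMax coins).toNat + 1) m
      simp only [eccFuel, hb, if_true]
    · have hb' : 0 < m - eccMax coins := by omega
      have hg1 : ∀ c ∈ coins, eccFuel coins f (m - c) = ecc coins (m - c) := by
        intro c hc
        have hc' := hpos c hc
        exact ih f (by omega) (m - c) (by omega)
      have hg2 : ∀ c ∈ coins,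
          eccFuel coins ((m - eccMax coins).toNat) (m - c) = ecc coins (m - c) := by
        intro c hc
        have hc' := hpos c hc
        exact ih _ (by omega) (m - c) (by omega)
      rw [eccFuel_succ_big coins hne f m hb hg1,
        show ecc coins m = eccFuel coins ((m - eccMax coins).toNat + 1) m from rfl,
        eccFuel_succ_big coins hne _ m hb hg2]

theorem ecc_base (coins : List Int) (m : Int) (hm : m ≤ eccMax coins) :
    ecc coins m = (if coins.contains m then 1 else -1) := by
  unfold ecc eccFuel
  rw [if_pos hm]
  by_cases h : coins.contains m
  · rw [h]
    norm_num
  · rw [Bool.eq_false_iff.mpr h]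
    norm_num


theorem ecc_big (coins : List Int) (hne : coins ≠ []) (hpos : ∀ c ∈ coins, 0 < c)
    (m : Int) (hm : ¬ m ≤ eccMax coins) :
    ecc coins m =
      (if coins.foldl (minStep (fun c => ecc coins (m - c))) (-1) = -1 then -1
       else coins.foldl (minStep (fun c => ecc coins (m - c))) (-1) + 1) := by
  rw [show ecc coins m = eccFuel coins ((m - eccMax coins).toNat + 1) m from rfl]
  refine eccFuel_succ_big coins hne _ m hm ?_
  intro c hc
  have hc' := hpos c hc
  exact stable coins hne hpos _ (m - c) (by omega)

theorem dp_spec (coins : List Int) (hne : coins ≠ []) (hpos : ∀ c ∈ coins, 0 < c) :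
    ∀ j : Nat,
      ((PySem.List.pyRange 0 (j : Int) 1).foldl (fun dp i =>
        let t := eccMax coins + 1 + i
        let best := coins.foldl (fun best c =>
          let v := if t - c ≤ eccMax coins then (if coins.contains (t - c) then 1 else -1)
                   else (PySem.List.pyGet? dp (t - c - eccMax coins - 1)).getD 0
          if v ≠ -1 ∧ (best = -1 ∨ v < best) then v else best) (-1)
        dp ++ [if best ≠ -1 then best + 1 else -1]) ([] : List Int))
      = List.map (fun i : Nat => ecc coins (eccMax coins + 1 + (i : Int))) (List.range j) := by
  intro j
  induction j with
  | zero =>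
    rw [show ((0 : Nat) : Int) = 0 from rfl, PySem.List.pyRange_one_eq_nil le_rfl]
    simp
  | succ j ih =>
    rw [show ((j + 1 : Nat) : Int) = (j : Int) + 1 by push_cast; ring,
      PySem.List.pyRange_one_succ_right (by positivity), List.foldl_append, ih,
      List.range_succ, List.map_append]
    simp only [List.foldl_cons, List.foldl_nil, List.map_cons, List.map_nil]
    congr 1
    have ht : ¬ eccMax coins + 1 + (j : Int) ≤ eccMax coins := by omega
    have hbest : coins.foldl (fun best c =>
        let v := if eccMax coins + 1 + (j : Int) - c ≤ eccMax coins then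
            (if coins.contains (eccMax coins + 1 + (j : Int) - c) then 1 else -1)
          else (PySem.List.pyGet?
              (List.map (fun i : Nat => ecc coins (eccMax coins + 1 + (i : Int))) (List.range j))
              (eccMax coins + 1 + (j : Int) - c - eccMax coins - 1)).getD 0
        if v ≠ -1 ∧ (best = -1 ∨ v < best) then v else best) (-1)
        = coins.foldl (minStep (fun c => ecc coins (eccMax coins + 1 + (j : Int) - c))) (-1) := by
      apply PySem.List.foldl_congr_mem
      intro acc c hc
      have hc' := hpos c hc
      unfold minStep
      beta_reduce
      by_cases hcase : eccMax coins + 1 + (j : Int) - c ≤ eccMax coins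
      · simp only [hcase, if_true, ecc_base coins _ hcase]
      · have h0 : 0 ≤ eccMax coins + 1 + (j : Int) - c - eccMax coins - 1 := by omega
        have hlt : (eccMax coins + 1 + (j : Int) - c - eccMax coins - 1).toNat < j := by omega
        simp only [hcase, if_false, PySem.List.pyGet?_of_nonneg _ h0, List.getElem?_map,
          List.getElem?_range hlt, Option.map_some, Option.getD_some]
        have h1 : (((eccMax coins + 1 + (j : Int) - c - eccMax coins - 1).toNat : Int))
            = (j : Int) - c := by omega
        rw [h1]
        have h2 : eccMax coins + 1 + ((j : Int) - c) = eccMax coins + 1 + (j : Int) - c := by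
          ring
        rw [h2]
    rw [hbest, ecc_big coins hne hpos _ ht]
    by_cases hMF : coins.foldl
        (minStep (fun c => ecc coins (eccMax coins + 1 + (j : Int) - c))) (-1) = -1
    · simp [hMF]
    · simp [hMF]

-- ===== VERDICT (by name: the statement is the Claim_ definition above) =====
theorem ecc_spec : Claim_equal_ecc := by
  intro coins m _ hpre
  obtain ⟨hne, hdisj⟩ := hpre
  unfold Spec_ecc
  by_cases hb : m ≤ eccMax coins
  · rw [ecc_base coins m hb]
    simp only [ecc_alt, hb, if_true]
  · have hpos : ∀ c ∈ coins, 0 < c := hdisj.resolve_left hb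
    simp only [ecc_alt, hb, if_false]
    have hj : (((m - eccMax coins).toNat : Int)) = m - eccMax coins := by omega
    rw [← hj, dp_spec coins hne hpos ((m - eccMax coins).toNat)]
    have h0 : 0 ≤ (((m - eccMax coins).toNat : Int)) - 1 := by omega
    have hlt : ((((m - eccMax coins).toNat : Int)) - 1).toNat < (m - eccMax coins).toNat := by
      omega
    rw [PySem.List.pyGet?_of_nonneg _ h0, List.getElem?_map, List.getElem?_range hlt]
    simp only [Option.map_some, Option.getD_some]
    have harg : eccMax coins + 1 +
        (((((m - eccMax coins).toNat : Int)) - 1).toNat : Int) = m := by omega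
    rw [harg]
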